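-- pv_equiv track=rewrite | github.com/Aidukevicius/Pokemon-game-new-best | server.py | validate_and_clamp_evs
-- ===== SOURCE A (Python) =====
-- MAX_TOTAL_EVS = 510
--
-- MAX_SINGLE_EV = 252
--
-- def validate_and_clamp_evs(evs):
--     """Validate EVs: max 252 per stat, max 510 total"""
--     if not evs:
--         return {'hp': 0, 'attack': 0, 'defense': 0, 'spAttack': 0, 'spDefense': 0, 'speed': 0}
--
--     stat_keys = ['hp', 'attack', 'defense', 'spAttack', 'spDefense', 'speed']
--     clamped = {}
--     total_used = 0
--
--     for key in stat_keys:
--         value = evs.get(key, 0)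
--         value = max(0, min(MAX_SINGLE_EV, value))
--
--         if total_used + value > MAX_TOTAL_EVS:
--             value = MAX_TOTAL_EVS - total_used
--
--         clamped[key] = value
--         total_used += value
--
--     return clamped
-- ===== SOURCE B (Python) =====
-- MAX_TOTAL_EVS = 510
-- MAX_SINGLE_EV = 252
--
-- STAT_KEYS = ['hp', 'attack', 'defense', 'spAttack', 'spDefense', 'speed']
--
-- def validate_and_clamp_evs(evs):
--     """Validate EVs: max 252 per stat, max 510 total (prefix-sum formulation)."""
--     if not evs:
--         return {k: 0 for k in STAT_KEYS}
--     # per-stat clamp table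
--     pre = [max(0, min(MAX_SINGLE_EV, evs.get(k, 0))) for k in STAT_KEYS]
--     # prefix sums, capped at the total budget; each stat gets the increment
--     sums = [0]
--     for v in pre:
--         sums.append(sums[-1] + v)
--     capped = [min(s, MAX_TOTAL_EVS) for s in sums]
--     deltas = [b - a for a, b in zip(capped, capped[1:])]
--     return dict(zip(STAT_KEYS, deltas))
-- ===== Notes on version B (the rewrite author's own statement) =====
-- stated objective: alternative
-- what changed: Replaces the single sequential loop carrying a running total and in-loop budget capping by a non-sequential formulation: a pre-clamped table, its prefix sums capped at 510, and each stat's value as the difference of consecutive capped prefix sums.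
import Mathlib
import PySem

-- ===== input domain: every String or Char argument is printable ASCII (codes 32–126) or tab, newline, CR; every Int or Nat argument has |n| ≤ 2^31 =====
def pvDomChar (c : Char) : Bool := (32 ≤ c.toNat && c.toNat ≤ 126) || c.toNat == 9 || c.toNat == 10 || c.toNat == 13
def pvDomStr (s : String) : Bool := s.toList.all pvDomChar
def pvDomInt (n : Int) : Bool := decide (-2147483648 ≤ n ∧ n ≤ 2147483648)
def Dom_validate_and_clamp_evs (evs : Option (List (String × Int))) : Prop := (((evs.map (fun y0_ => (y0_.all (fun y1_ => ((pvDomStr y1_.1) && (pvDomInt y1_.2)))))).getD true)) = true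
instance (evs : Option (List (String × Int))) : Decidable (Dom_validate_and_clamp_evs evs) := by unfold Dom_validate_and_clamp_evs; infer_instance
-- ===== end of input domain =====

-- B replaces A's sequential budget loop by capped prefix sums; objective: alternative decomposition.
-- ===== PORT A =====
def pvStatKeys : List String := ["hp", "attack", "defense", "spAttack", "spDefense", "speed"]

def pvZeroEVs : List (String × Int) :=
  [("hp", 0), ("attack", 0), ("defense", 0), ("spAttack", 0), ("spDefense", 0), ("speed", 0)]

def validate_and_clamp_evs (evs : Option (List (String × Int))) : List (String × Int) :=
  match evs with
  | none => pvZeroEVs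
  | some d =>
    if d = [] then pvZeroEVs
    else
      -- the six keys are distinct, so inserting into the fresh dict appends in key order
      let r := pvStatKeys.foldl (fun (st : List (String × Int) × Int) key =>
        let value := PySem.Dict.getD (PySem.Dict.mk d) key 0
        let value := max 0 (min 252 value)
        let value := if st.2 + value > 510 then 510 - st.2 else value
        (st.1 ++ [(key, value)], st.2 + value)) ([], 0)
      r.1

-- ===== PORT B =====
def pvSTAT_KEYS : List String := ["hp", "attack", "defense", "spAttack", "spDefense", "speed"]

def validate_and_clamp_evs_alt (evs : Option (List (String × Int))) : List (String × Int) :=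
  match evs with
  | none => pvSTAT_KEYS.map (fun k => (k, 0))
  | some d =>
    if d = [] then pvSTAT_KEYS.map (fun k => (k, 0))
    else
      let pre := pvSTAT_KEYS.map (fun k => max 0 (min 252 (PySem.Dict.getD (PySem.Dict.mk d) k 0)))
      let sums := pre.foldl (fun acc v => acc ++ [PySem.List.pyGetD acc (-1) 0 + v]) [0]
      let capped := sums.map (fun s => min s 510)
      let deltas := (capped.zip (PySem.List.slice capped (some 1) none)).map (fun p => p.2 - p.1)
      pvSTAT_KEYS.zip deltas

-- ===== PRECONDITION & SPEC =====
def Spec_validate_and_clamp_evs (evs : Option (List (String × Int))) (out : List (String × Int)) : Prop := out = validate_and_clamp_evs_alt evs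
instance (evs : Option (List (String × Int))) (out : List (String × Int)) : Decidable (Spec_validate_and_clamp_evs evs out) := by unfold Spec_validate_and_clamp_evs; infer_instance

-- ===== CLAIM =====
def Claim_equal_validate_and_clamp_evs : Prop := ∀ (evs : Option (List (String × Int))), Dom_validate_and_clamp_evs evs → Spec_validate_and_clamp_evs evs (validate_and_clamp_evs evs)

-- ===== LEMMAS AND PROOFS =====
theorem pv_pyGetD_singleton_neg_one (x d : Int) : PySem.List.pyGetD [x] (-1) d = x := by
  simp [PySem.List.pyGetD, PySem.List.pyGet?, PySem.List.pyIdx?]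

/-- The per-key budgeted deltas, starting from running pre-clamp sum `S`. -/
def pvDeltas (f : String → Int) (S : Int) : List String → List (String × Int)
  | [] => []
  | k :: ks =>
    let c := max 0 (min 252 (f k))
    (k, min (S + c) 510 - min S 510) :: pvDeltas f (S + c) ks

/-- Invariant of A's loop: output = accumulated deltas, total = capped prefix sum. -/
theorem pv_loopA (f : String → Int) (ks : List String) :
    ∀ (out : List (String × Int)) (S t : Int), 0 ≤ S → t = min S 510 →
    ks.foldl (fun (st : List (String × Int) × Int) key =>
        let value := f key
        let value := max 0 (min 252 value)
        let value := if st.2 + value > 510 then 510 - st.2 else value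
        (st.1 ++ [(key, value)], st.2 + value)) (out, t) =
      (out ++ pvDeltas f S ks, min (S + (ks.map (fun k => max 0 (min 252 (f k)))).sum) 510) := by
  induction ks with
  | nil => intro out S t _ ht; simp [pvDeltas, ht]
  | cons k ks ih =>
    intro out S t hS ht
    subst ht
    have hc : 0 ≤ max 0 (min 252 (f k)) := le_max_left 0 _
    rw [List.foldl_cons]
    have hstep :
        (if min S 510 + max 0 (min 252 (f k)) > 510 then 510 - min S 510
         else max 0 (min 252 (f k))) = min (S + max 0 (min 252 (f k))) 510 - min S 510 := by
      omega
    have htot : min S 510 + (min (S + max 0 (min 252 (f k))) 510 - min S 510)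
        = min (S + max 0 (min 252 (f k))) 510 := by omega
    simp only [hstep, htot]
    have := ih (out ++ [(k, min (S + max 0 (min 252 (f k))) 510 - min S 510)])
      (S + max 0 (min 252 (f k))) _ (by omega) rfl
    rw [this]
    simp [pvDeltas, List.append_assoc]
    omega

-- ===== VERDICT =====
set_option maxHeartbeats 1600000 in
theorem validate_and_clamp_evs_spec : Claim_equal_validate_and_clamp_evs := by
  intro evs _
  unfold Spec_validate_and_clamp_evs
  cases evs with
  | none => rfl
  | some d =>
    by_cases hd : d = []
    · simp [validate_and_clamp_evs, validate_and_clamp_evs_alt, hd, pvZeroEVs, pvStatKeys, pvSTAT_KEYS]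
    · simp only [validate_and_clamp_evs, validate_and_clamp_evs_alt, pvStatKeys, pvSTAT_KEYS, pvZeroEVs]
      rw [if_neg hd, if_neg hd]
      have hA := pv_loopA (fun key => PySem.Dict.getD (PySem.Dict.mk d) key 0)
        ["hp", "attack", "defense", "spAttack", "spDefense", "speed"] [] 0 0 le_rfl (by norm_num)
      rw [hA]
      dsimp only
      simp only [pvDeltas, List.nil_append]
      simp only [List.map_cons, List.map_nil, List.foldl_cons, List.foldl_nil,
        pv_pyGetD_singleton_neg_one, PySem.List.pyGetD_neg_one_append_singleton]
      simp only [List.cons_append, List.nil_append, List.map_cons, List.map_nil,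
        PySem.List.slice_from_one, List.tail_cons, List.zip_cons_cons, List.zip_nil_right]
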